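-- pv_equiv track=rewrite | github.com/I-bluebeard-I/python-study | Lesson_5/part01_lesson05_task03.py | gen_cort
-- ===== SOURCE A (Python) =====
-- def gen_cort(len_of_list):
--     count = 1
--     while count <= len_of_list:
--         for pos, word in enumerate(tutors):
--             try:
--                 new_cort = (tutors[pos], klass[pos])
--             except IndexError:
--                 new_cort = (tutors[pos], None)
--             yield new_cort
--             count += 1
--
-- tutors = ['Иван', 'Анастасия', 'Петр', 'Сергей', 'Дмитрий', 'Борис', 'Елена']
--
-- klass = ['9А', '7В', '9Б', '9В', '8Б', '10А', '10Б', '9А']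
-- ===== SOURCE B (Python) =====
-- tutors = ['Иван', 'Анастасия', 'Петр', 'Сергей', 'Дмитрий', 'Борис', 'Елена']
--
-- klass = ['9А', '7В', '9Б', '9В', '8Б', '10А', '10Б', '9А']
--
-- def gen_cort(len_of_list):
--     # total number of emitted tuples: len rounded up to a full pass of the 7 tutors
--     total = 7 * ((len_of_list + 6) // 7)
--     for i in range(total):
--         yield (tutors[i % 7], klass[i % 7])
-- ===== Notes on version B (the rewrite author's own statement) =====
-- stated objective: alternative
-- what changed: Replaces A's nested cycling (outer while on a per-yield counter, inner enumerate pass with try/except) by one flat index loop: the total output length 7*((len_of_list+6)//7) is computed in closed form and each tuple is produced independently from its index via modular lookups tutors[i%7], klass[i%7].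
import Mathlib
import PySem

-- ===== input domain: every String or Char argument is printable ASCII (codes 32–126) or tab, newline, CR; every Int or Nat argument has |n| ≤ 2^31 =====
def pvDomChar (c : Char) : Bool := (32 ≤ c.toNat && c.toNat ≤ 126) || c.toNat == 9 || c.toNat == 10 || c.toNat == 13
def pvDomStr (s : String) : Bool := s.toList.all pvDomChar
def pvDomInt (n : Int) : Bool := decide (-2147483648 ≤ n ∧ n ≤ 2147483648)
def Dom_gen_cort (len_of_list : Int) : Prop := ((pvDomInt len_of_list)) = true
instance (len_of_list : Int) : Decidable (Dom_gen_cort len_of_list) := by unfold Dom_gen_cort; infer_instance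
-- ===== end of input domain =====

-- B replaces A's nested cycling (while on a per-yield counter + enumerate pass with
-- try/except) by a single flat index loop of closed-form length 7*((len+6)//7), each
-- tuple computed independently from its index via modular lookups; objective: alternative.

-- module-level constants (shared context of both programs)
def pyTutors : List String := ["Иван", "Анастасия", "Петр", "Сергей", "Дмитрий", "Борис", "Елена"]
def pyKlass : List String := ["9А", "7В", "9Б", "9В", "8Б", "10А", "10Б", "9А"]

-- ===== PORT A =====
-- the while loop: each pass yields one tuple per tutor, count += 1 per yield,
-- the while condition is re-checked only between passes.
-- tutors[pos] is always in range (pos < len(tutors)), so the '.getD pw.2' default never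
-- fires; the try/except maps an IndexError of klass[pos] to none, i.e. Option.
def gen_cortLoop (len_of_list count : Int) : List (String × Option String) :=
  if count ≤ len_of_list then
    ((PySem.List.enumerate pyTutors).map (fun pw =>
        ((PySem.List.pyGet? pyTutors pw.1).getD pw.2,
         PySem.List.pyGet? pyKlass pw.1)))
      ++ gen_cortLoop len_of_list (count + (pyTutors.length : Int))
  else []
termination_by (len_of_list + 1 - count).toNat
decreasing_by simp [pyTutors]; omega

def gen_cort (len_of_list : Int) : List (String × Option String) :=
  gen_cortLoop len_of_list 1

-- ===== PORT B =====
-- total = 7 * ((len_of_list + 6) // 7); for i in range(total): yield (tutors[i%7], klass[i%7]).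
-- i % 7 is always in range for both lists, so the '.getD ""' defaults never fire; the
-- second component is wrapped in 'some' to fit the return type (B never yields None).
def gen_cort_alt (len_of_list : Int) : List (String × Option String) :=
  let total := 7 * PySem.Int.floordiv (len_of_list + 6) 7
  (PySem.List.pyRange 0 total 1).map (fun i =>
    ((PySem.List.pyGet? pyTutors (PySem.Int.mod i 7)).getD "",
     some ((PySem.List.pyGet? pyKlass (PySem.Int.mod i 7)).getD "")))

-- ===== PRECONDITION & SPEC =====
def Spec_gen_cort (len_of_list : Int) (out : List (String × Option String)) : Prop := out = gen_cort_alt len_of_list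
instance (len_of_list : Int) (out : List (String × Option String)) : Decidable (Spec_gen_cort len_of_list out) := by unfold Spec_gen_cort; infer_instance

-- ===== CLAIM (what is proved, stated in full; the proofs are below) =====
def Claim_equal_gen_cort : Prop := ∀ (len_of_list : Int), Dom_gen_cort len_of_list → Spec_gen_cort len_of_list (gen_cort len_of_list)

-- ===== LEMMAS AND PROOFS =====

def pvPairs : List (String × Option String) :=
  (pyTutors.zip pyKlass).map (fun tk => (tk.1, some tk.2))

theorem pvPairsA_eq :
    ((PySem.List.enumerate pyTutors).map (fun pw =>
        ((PySem.List.pyGet? pyTutors pw.1).getD pw.2,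
         PySem.List.pyGet? pyKlass pw.1))) = pvPairs := by
  decide

theorem gen_cortLoop_eq (len count : Int) :
    gen_cortLoop len count
      = (List.replicate ((PySem.Int.floordiv (len - count + 7) 7).toNat) pvPairs).flatten := by
  rw [gen_cortLoop]
  split
  · rename_i h
    rw [gen_cortLoop_eq len (count + (pyTutors.length : Int)), pvPairsA_eq]
    have h7 : (pyTutors.length : Int) = 7 := by decide
    rw [h7]
    have e1 : PySem.Int.floordiv (len - count + 7) 7 = (len - count + 7) / 7 :=
      PySem.Int.floordiv_eq_ediv_of_pos (by omega)
    have e2 : PySem.Int.floordiv (len - (count + 7) + 7) 7 = (len - (count + 7) + 7) / 7 :=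
      PySem.Int.floordiv_eq_ediv_of_pos (by omega)
    rw [e1, e2]
    have hq : ((len - count + 7) / 7).toNat = ((len - (count + 7) + 7) / 7).toNat + 1 := by
      omega
    rw [hq, List.replicate_succ, List.flatten_cons]
  · rename_i h
    have e1 : PySem.Int.floordiv (len - count + 7) 7 = (len - count + 7) / 7 :=
      PySem.Int.floordiv_eq_ediv_of_pos (by omega)
    have : ((len - count + 7) / 7).toNat = 0 := by omega
    rw [e1, this]
    simp
termination_by (len + 1 - count).toNat
decreasing_by simp [pyTutors]; omega

-- B's body as a named function of the index
def pvB (i : Int) : String × Option String :=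
  ((PySem.List.pyGet? pyTutors (PySem.Int.mod i 7)).getD "",
   some ((PySem.List.pyGet? pyKlass (PySem.Int.mod i 7)).getD ""))

theorem pvB_mod (n : Nat) (k : Int) :
    pvB (7 * (n : Int) + k) = pvB k := by
  have hm : PySem.Int.mod (7 * (n : Int) + k) 7 = PySem.Int.mod k 7 := by
    rw [PySem.Int.mod_eq_emod_of_pos (by norm_num), PySem.Int.mod_eq_emod_of_pos (by norm_num)]
    omega
  simp only [pvB, hm]

theorem map_pvB_block (n : Nat) :
    (PySem.List.pyRange (7 * (n : Int)) (7 * ((n : Int) + 1)) 1).map pvB = pvPairs := by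
  have h : (7 : Int) * ((n : Int) + 1) = 7 * (n : Int) + 7 := by ring
  rw [h, PySem.List.pyRange_one]
  have h2 : ((7 * (n : Int) + 7 - 7 * (n : Int)).toNat) = 7 := by omega
  rw [h2]
  show List.map pvB (List.map _ [0,1,2,3,4,5,6]) = pvPairs
  simp only [List.map]
  push_cast
  rw [pvB_mod n 0, pvB_mod n 1, pvB_mod n 2, pvB_mod n 3,
      pvB_mod n 4, pvB_mod n 5, pvB_mod n 6]
  decide

theorem map_pvB_range (n : Nat) :
    (PySem.List.pyRange 0 (7 * (n : Int)) 1).map pvB = (List.replicate n pvPairs).flatten := by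
  induction n with
  | zero => simp
  | succ m ih =>
    have hsplit := PySem.List.pyRange_one_append 0 (7 * (m : Int)) (7 * ((m : Int) + 1))
      (by positivity) (by omega)
    push_cast
    push_cast at ih
    rw [hsplit, List.map_append, ih, map_pvB_block m]
    rw [List.replicate_succ', List.flatten_append]
    simp

theorem gen_cort_alt_eq (len : Int) :
    gen_cort_alt len
      = (List.replicate ((PySem.Int.floordiv (len + 6) 7).toNat) pvPairs).flatten := by
  show (PySem.List.pyRange 0 (7 * PySem.Int.floordiv (len + 6) 7) 1).map pvB = _
  set q := PySem.Int.floordiv (len + 6) 7 with hq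
  by_cases h : 0 ≤ q
  · have : q = (q.toNat : Int) := by omega
    rw [this, map_pvB_range, Int.toNat_natCast]
  · rw [PySem.List.pyRange_one_eq_nil (by omega)]
    have : q.toNat = 0 := by omega
    rw [this]
    simp

-- ===== VERDICT (by name: the statement is the Claim_ definition above) =====
theorem gen_cort_spec : Claim_equal_gen_cort := by
  intro len _
  show gen_cort len = gen_cort_alt len
  rw [gen_cort, gen_cortLoop_eq, gen_cort_alt_eq]
  have : len - 1 + 7 = len + 6 := by ring
  rw [this]
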